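-- pv_equiv track=rewrite | github.com/uedaLabR/nanoDoc | for_profile/ROCAll.py | getAnswerLabel
-- ===== SOURCE A (Python) =====
-- def getAnswerLabel(dl,xcoords):
--     r =[]
--     for i in range(dl):
--         if  (i-1 in xcoords) or (i in xcoords) or (i+1 in xcoords) :
--             r.append(1)
--         else:
--             r.append(0)
--     return r
-- ===== SOURCE B (Python) =====
-- def getAnswerLabel(dl, xcoords):
--     r = [0] * dl
--     for c in xcoords:
--         for pos in (c - 1, c, c + 1):
--             if 0 <= pos < dl:
--                 r[pos] = 1
--     return r
-- ===== Notes on version B (the rewrite author's own statement) =====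
-- stated objective: faster
-- what changed: Instead of testing every index against the whole coordinate list (three 'in' scans per index), B allocates a zero array once and scatters a 1 into the three neighbor positions of each coordinate.
import Mathlib
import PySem

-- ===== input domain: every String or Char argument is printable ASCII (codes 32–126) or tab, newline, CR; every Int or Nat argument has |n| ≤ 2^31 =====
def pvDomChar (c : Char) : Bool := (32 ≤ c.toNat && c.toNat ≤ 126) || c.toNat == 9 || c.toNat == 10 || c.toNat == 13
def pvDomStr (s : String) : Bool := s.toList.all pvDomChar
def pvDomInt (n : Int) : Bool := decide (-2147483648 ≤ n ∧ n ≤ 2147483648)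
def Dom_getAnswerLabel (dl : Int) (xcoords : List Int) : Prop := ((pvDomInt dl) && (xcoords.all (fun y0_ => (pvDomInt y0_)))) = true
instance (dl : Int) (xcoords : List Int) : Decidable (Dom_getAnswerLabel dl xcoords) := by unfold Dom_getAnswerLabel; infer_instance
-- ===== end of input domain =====

-- B replaces A's per-index triple membership scan with a single scatter pass over the
-- coordinates into a preallocated zero array (objective: faster, O(dl+k) vs O(dl*k)).

-- ===== PORT A =====
-- for i in range(dl): append 1 if (i-1 in xcoords) or (i in xcoords) or (i+1 in xcoords) else 0
def getAnswerLabel (dl : Int) (xcoords : List Int) : List Int :=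
  (PySem.List.pyRange 0 dl 1).foldl
    (fun r i =>
      r ++ [if xcoords.contains (i - 1) || xcoords.contains i || xcoords.contains (i + 1)
            then (1 : Int) else 0])
    []

-- ===== PORT B =====
-- inner loop of Source B: for pos in (c-1, c, c+1): if 0 <= pos < dl: r[pos] = 1
def setIf (dl : Int) (r : List Int) (pos : Int) : List Int :=
  if 0 ≤ pos ∧ pos < dl then r.set pos.toNat 1 else r

def markB (dl : Int) (r : List Int) (c : Int) : List Int :=
  [c - 1, c, c + 1].foldl (setIf dl) r

def getAnswerLabel_alt (dl : Int) (xcoords : List Int) : List Int :=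
  xcoords.foldl (markB dl) (List.replicate dl.toNat 0)

-- ===== PRECONDITION & SPEC =====
def Spec_getAnswerLabel (dl : Int) (xcoords : List Int) (out : List Int) : Prop := out = getAnswerLabel_alt dl xcoords
instance (dl : Int) (xcoords : List Int) (out : List Int) : Decidable (Spec_getAnswerLabel dl xcoords out) := by unfold Spec_getAnswerLabel; infer_instance

-- ===== CLAIM (what is proved, stated in full; the proofs are below) =====
def Claim_equal_getAnswerLabel : Prop := ∀ (dl : Int) (xcoords : List Int), Dom_getAnswerLabel dl xcoords → Spec_getAnswerLabel dl xcoords (getAnswerLabel dl xcoords)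

-- ===== LEMMAS AND PROOFS =====

theorem foldl_append_singleton (f : Int → Int) :
    ∀ (l : List Int) (acc : List Int),
      l.foldl (fun r i => r ++ [f i]) acc = acc ++ l.map f := by
  intro l
  induction l with
  | nil => simp
  | cons x xs ih => intro acc; simp [List.foldl_cons, ih]

theorem setIf_length (dl : Int) (r : List Int) (pos : Int) :
    (setIf dl r pos).length = r.length := by
  unfold setIf; split_ifs <;> simp

theorem markB_length (dl : Int) (r : List Int) (c : Int) :
    (markB dl r c).length = r.length := by
  simp [markB, setIf_length]

theorem foldl_markB_length (dl : Int) (xs : List Int) :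
    ∀ (r : List Int), (xs.foldl (markB dl) r).length = r.length := by
  induction xs with
  | nil => intro r; simp
  | cons c cs ih => intro r; simp [List.foldl_cons, ih, markB_length]

theorem setIf_getElem (dl : Int) (r : List Int) (pos : Int) (j : ℕ)
    (hr : r.length = dl.toNat) (hj : j < dl.toNat)
    (h : j < (setIf dl r pos).length) :
    (setIf dl r pos)[j]'h
      = if (j : Int) = pos then 1 else r[j]'(hr ▸ hj) := by
  unfold setIf at h ⊢
  by_cases hg : 0 ≤ pos ∧ pos < dl
  · simp only [if_pos hg] at h ⊢
    by_cases he : (j : Int) = pos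
    · have hp : pos.toNat = j := by omega
      rw [if_pos he]
      simp [hp]
    · have hp : pos.toNat ≠ j := by omega
      rw [if_neg he]
      simp [hp]
  · simp only [if_neg hg] at h ⊢
    have he : (j : Int) ≠ pos := by omega
    rw [if_neg he]

theorem markB_getElem (dl : Int) (r : List Int) (c : Int) (j : ℕ)
    (hr : r.length = dl.toNat) (hj : j < dl.toNat)
    (h : j < (markB dl r c).length) :
    (markB dl r c)[j]'h
      = if (j : Int) = c - 1 ∨ (j : Int) = c ∨ (j : Int) = c + 1 then 1
        else r[j]'(hr ▸ hj) := by
  simp only [markB, List.foldl_cons, List.foldl_nil] at h ⊢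
  have l1 : (setIf dl r (c - 1)).length = dl.toNat := by rw [setIf_length]; exact hr
  have l2 : (setIf dl (setIf dl r (c - 1)) c).length = dl.toNat := by
    rw [setIf_length, setIf_length]; exact hr
  rw [setIf_getElem dl _ (c + 1) j l2 hj, setIf_getElem dl _ c j l1 hj,
      setIf_getElem dl r (c - 1) j hr hj]
  by_cases e1 : (j : Int) = c + 1 <;> by_cases e2 : (j : Int) = c <;>
    by_cases e3 : (j : Int) = c - 1 <;> simp [e1, e2, e3] <;> omega

theorem foldl_markB_getElem (dl : Int) (xs : List Int) :
    ∀ (r : List Int) (hr : r.length = dl.toNat) (j : ℕ) (hj : j < dl.toNat),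
      (xs.foldl (markB dl) r)[j]'(by rw [foldl_markB_length]; omega)
        = if xs.any (fun c => (j : Int) = c - 1 ∨ (j : Int) = c ∨ (j : Int) = c + 1)
          then 1 else r[j]'(hr ▸ hj) := by
  induction xs with
  | nil => intro r hr j hj; simp
  | cons c cs ih =>
      intro r hr j hj
      simp only [List.foldl_cons]
      rw [ih (markB dl r c) (by rw [markB_length]; exact hr) j hj]
      rw [markB_getElem dl r c j hr hj]
      simp only [List.any_cons]
      by_cases hc : (j : Int) = c - 1 ∨ (j : Int) = c ∨ (j : Int) = c + 1 <;>
        by_cases hcs : cs.any (fun c => decide ((j : Int) = c - 1) ||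
          (decide ((j : Int) = c) || decide ((j : Int) = c + 1))) = true <;>
        simp_all

theorem near_iff (xs : List Int) (j : Int) :
    (xs.contains (j - 1) || xs.contains j || xs.contains (j + 1)) = true
      ↔ xs.any (fun c => j = c - 1 ∨ j = c ∨ j = c + 1) = true := by
  simp only [Bool.or_eq_true, List.contains_iff_mem, List.any_eq_true,
    decide_eq_true_eq]
  constructor
  · rintro ((h | h) | h)
    · exact ⟨j - 1, h, by omega⟩
    · exact ⟨j, h, by omega⟩
    · exact ⟨j + 1, h, by omega⟩
  · rintro ⟨c, hc, (h | h | h)⟩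
    · right; have hcj : j + 1 = c := by omega
      rw [hcj]; exact hc
    · left; right; rw [h]; exact hc
    · left; left; have hcj : j - 1 = c := by omega
      rw [hcj]; exact hc

-- ===== VERDICT (by name: the statement is the Claim_ definition above) =====
theorem getAnswerLabel_spec : Claim_equal_getAnswerLabel := by
  intro dl xs _
  unfold Spec_getAnswerLabel getAnswerLabel getAnswerLabel_alt
  rw [foldl_append_singleton]
  apply List.ext_getElem
  · rw [foldl_markB_length]
    simp [PySem.List.length_pyRange_one]
  · intro j h1 h2
    have hj : j < dl.toNat := by
      simpa [PySem.List.length_pyRange_one] using h1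
    rw [foldl_markB_getElem dl xs _ (by simp) j hj]
    simp only [List.nil_append, List.getElem_map, PySem.List.getElem_pyRange_one,
      zero_add, List.getElem_replicate]
    by_cases hn : xs.any (fun c => (j:Int) = c - 1 ∨ (j:Int) = c ∨ (j:Int) = c + 1) = true
    · rw [if_pos ((near_iff xs j).mpr hn), if_pos hn]
    · rw [if_neg (fun h => hn ((near_iff xs j).mp h)), if_neg hn]
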